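-- pv_equiv track=rewrite | github.com/Zmdrmyvyg/leetcode-master | mysolutions/tt ball arrangement.py | findMaximumEngagement
-- ===== SOURCE A (Python) =====
-- def findMaximumEngagement(balls):
--     balls.sort(reverse = True) # 从大到小排列
--     queue = []
--     score = 0
--
--     first = balls[0]
--     queue.append(first)
--
--     for ball in balls[1:]:
--         max_contrib = 0
--         insert = 0
--
--         for i in range(len(queue)):
--             left = queue[(i-1)%len(queue)] # 重要！
--             right = queue[i]
--             contrib = min(left, right)
--             if contrib > max_contrib:
--                 max_contrib = contrib
--                 insert = i
--
--         queue.insert(insert, ball)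
--         score += max_contrib
--
--     return score
-- ===== SOURCE B (Python) =====
-- def findMaximumEngagement(balls):
--     # Closed form: sorted descending, ball k (1-based insertion order) always
--     # contributes min-gap value s[k//2], clamped at 0 (A never adds a negative
--     # contribution).  O(n log n) instead of A's O(n^2) greedy simulation.
--     s = sorted(balls, reverse=True)
--     total = 0
--     for k in range(1, len(s)):
--         total += max(0, s[k // 2])
--     return total
-- ===== Notes on version B (the rewrite author's own statement) =====
-- stated objective: faster
-- what changed: Replaces the quadratic greedy circular-insertion simulation by a closed form: after sorting descending, the k-th inserted ball always contributes the (clamped-at-zero) sorted value at index k//2, so the answer is a single linear sum after the sort.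
import Mathlib
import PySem

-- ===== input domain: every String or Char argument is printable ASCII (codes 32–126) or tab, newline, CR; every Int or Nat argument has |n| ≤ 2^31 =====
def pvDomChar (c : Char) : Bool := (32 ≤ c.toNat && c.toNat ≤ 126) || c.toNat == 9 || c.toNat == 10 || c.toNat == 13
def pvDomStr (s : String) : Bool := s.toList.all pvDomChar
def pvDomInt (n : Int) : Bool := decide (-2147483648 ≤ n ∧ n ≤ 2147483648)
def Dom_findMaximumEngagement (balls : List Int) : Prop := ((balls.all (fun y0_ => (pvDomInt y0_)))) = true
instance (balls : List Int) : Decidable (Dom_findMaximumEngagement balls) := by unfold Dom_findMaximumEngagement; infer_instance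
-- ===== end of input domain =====

-- B replaces A's O(n^2) greedy circular-insertion simulation by a closed-form sum
-- after one descending sort (A also sorts its argument in place; the equivalence
-- proved here is about the return value only).

-- ===== PORT A =====
-- the inner 'for i in range(len(queue))' argmax scan of A
def pvInnerLoop (q : List Int) : Int × Int :=
  (PySem.List.pyRange 0 (q.length : Int) 1).foldl
    (fun (mi : Int × Int) i =>
      let left := PySem.List.pyGetD q (PySem.Int.mod (i - 1) (q.length : Int)) 0
      let right := PySem.List.pyGetD q i 0
      let contrib := min left right
      if mi.1 < contrib then (contrib, i) else mi)
    (0, 0)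

-- one iteration of A's outer 'for ball in balls[1:]' loop (state = (queue, score))
def pvStepA (st : List Int × Int) (ball : Int) : List Int × Int :=
  let r := pvInnerLoop st.1
  (PySem.List.insert st.1 r.2 ball, st.2 + r.1)

def findMaximumEngagement (balls : List Int) : Int :=
  let s := PySem.List.sorted balls (fun x => x) true
  let first := PySem.List.pyGetD s 0 0      -- the first-element read; the IndexError case (empty input) is excluded by Pre_
  ((PySem.List.slice s (some 1) none).foldl pvStepA ([first], 0)).2

-- ===== PORT B =====
def findMaximumEngagement_alt (balls : List Int) : Int :=
  let s := PySem.List.sorted balls (fun x => x) true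
  (PySem.List.pyRange 1 (s.length : Int) 1).foldl
    (fun total k => total + max 0 (PySem.List.pyGetD s (PySem.Int.floordiv k 2) 0)) 0

-- ===== PRECONDITION & SPEC =====
-- A reads the first element of its sorted argument: it raises IndexError exactly on the empty list.
def Pre_findMaximumEngagement (balls : List Int) : Prop := balls ≠ []
instance (balls : List Int) : Decidable (Pre_findMaximumEngagement balls) := by
  unfold Pre_findMaximumEngagement; infer_instance

def pvWitness_findMaximumEngagement : List Int := [3, 1, 2]

def Spec_findMaximumEngagement (balls : List Int) (out : Int) : Prop :=
  out = findMaximumEngagement_alt balls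
instance (balls : List Int) (out : Int) : Decidable (Spec_findMaximumEngagement balls out) := by
  unfold Spec_findMaximumEngagement; infer_instance

-- ===== CLAIM (what is proved, stated in full; the proofs are below) =====
def Claim_equal_findMaximumEngagement : Prop :=
  ∀ (balls : List Int), Dom_findMaximumEngagement balls →
    Pre_findMaximumEngagement balls →
    Spec_findMaximumEngagement balls (findMaximumEngagement balls)

-- ===== LEMMAS AND PROOFS =====


-- clamp at 0 (A only ever adds positive contributions)
def pvClamp (x : Int) : Int := max 0 x

-- mins of adjacent (non-circular) pairs of q
def pvPmins (q : List Int) : List Int := (q.zip (q.drop 1)).map (fun p => min p.1 p.2)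

-- circular gap mins of q in A's loop order: index 0 is the wrap-around gap
def pvGaps (q : List Int) : List Int :=
  min (q.getD (q.length - 1) 0) (q.getD 0 0) :: pvPmins q

-- the contribution A's inner loop computes at loop index i
def pvContribAt (q : List Int) (i : Int) : Int :=
  min (PySem.List.pyGetD q (PySem.Int.mod (i - 1) (q.length : Int)) 0)
      (PySem.List.pyGetD q i 0)

-- abstract form of A's inner argmax scan
def pvArgmax : List Int → Int → Int × Int → Int × Int
  | [], _, st => st
  | c :: t, s, st => pvArgmax t (s + 1) (if st.1 < c then (c, s) else st)

-- the ideal gap multiset after k insertions, as an explicit list over s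
def pvIdeal (s : List Int) (k : Nat) : List Int :=
  (if k % 2 = 0 then [s.getD (k / 2) 0] else []) ++
    (List.range' (k / 2 + 1) (k - k / 2)).flatMap (fun j => [s.getD j 0, s.getD j 0])

-- the tail sum: sum over j = k .. n-1 of clamp(s[j/2])
def pvTailSum (s : List Int) (k : Nat) : Int :=
  ((List.range' k (s.length - k)).map (fun j => pvClamp (s.getD (j / 2) 0))).sum

lemma pvPmins_cons₂ (a b : Int) (t : List Int) :
    pvPmins (a :: b :: t) = min a b :: pvPmins (b :: t) := by
  simp [pvPmins]

lemma pvPmins_length (q : List Int) : (pvPmins q).length = q.length - 1 := by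
  simp [pvPmins]

lemma pvPmins_getD (q : List Int) (j : Nat) (h : j + 1 < q.length) :
    (pvPmins q).getD j 0 = min (q.getD j 0) (q.getD (j + 1) 0) := by
  have h1 : j < (pvPmins q).length := by rw [pvPmins_length]; omega
  rw [List.getD_eq_getElem _ _ h1, List.getD_eq_getElem _ _ (by omega : j < q.length),
    List.getD_eq_getElem _ _ h]
  simp [pvPmins, List.getElem_zip, List.getElem_drop, Nat.add_comm]

lemma pvPmins_append (a b : List Int) (ha : a ≠ []) (hb : b ≠ []) :
    pvPmins (a ++ b) =
      pvPmins a ++ min (a.getD (a.length - 1) 0) (b.getD 0 0) :: pvPmins b := by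
  induction a with
  | nil => exact absurd rfl ha
  | cons y a' ih =>
    cases a' with
    | nil =>
      obtain ⟨hb0, tb, rfl⟩ := List.exists_cons_of_ne_nil hb
      simp [pvPmins_cons₂, pvPmins]
    | cons z a'' =>
      have ih' := ih (List.cons_ne_nil z a'')
      simp only [List.cons_append] at ih' ⊢
      rw [pvPmins_cons₂, ih', pvPmins_cons₂]
      simp only [List.cons_append, List.length_cons, Nat.add_sub_cancel, List.getD_cons_succ,
        List.getD_eq_getElem?_getD]
      rfl

lemma pvContribAt_eq (q : List Int) (hq : q ≠ []) (j : Nat) (hj : j < q.length) :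
    pvContribAt q (j : Int) = (pvGaps q).getD j 0 := by
  have hn : 0 < q.length := List.length_pos_of_ne_nil hq
  have hpos : (0 : Int) < (q.length : Int) := by exact_mod_cast hn
  unfold pvContribAt pvGaps
  rcases Nat.eq_zero_or_pos j with rfl | hj1
  · have hmod : PySem.Int.mod (((0 : Nat) : Int) - 1) ((q.length : Int)) =
        (q.length : Int) - 1 := by
      rw [PySem.Int.mod_eq_emod_of_pos hpos]
      have h2 := Int.add_mul_emod_self_left (a := (-1 : Int)) (b := ((q.length : Int))) (c := 1)
      rw [show (-1 + (q.length : Int) * 1) = (q.length : Int) - 1 by ring] at h2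
      rw [show (((0 : Nat) : Int) - 1) = -1 by simp, ← h2]
      exact Int.emod_eq_of_lt (by omega) (by omega)
    rw [hmod, show ((q.length : Int) - 1) = ((q.length - 1 : Nat) : Int) by omega,
      PySem.List.pyGetD_natCast]
    simp [PySem.List.pyGetD_zero]
  · obtain ⟨j', rfl⟩ : ∃ j', j = j' + 1 := ⟨j - 1, by omega⟩
    have hmod : PySem.Int.mod ((((j' + 1 : Nat)) : Int) - 1) ((q.length : Int)) =
        ((j' : Nat) : Int) := by
      rw [PySem.Int.mod_eq_emod_of_pos hpos,
        show ((((j' + 1 : Nat)) : Int) - 1) = ((j' : Nat) : Int) by push_cast; ring]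
      exact Int.emod_eq_of_lt (by omega) (by omega)
    rw [hmod, PySem.List.pyGetD_natCast, PySem.List.pyGetD_natCast, List.getD_cons_succ,
      pvPmins_getD q j' (by omega)]

lemma pvArgmax_aux (q : List Int) (g : List Int) :
    ∀ (a : Nat) (st : Int × Int),
      (∀ j, j < g.length → pvContribAt q ((a + j : Nat) : Int) = g.getD j 0) →
      (PySem.List.pyRange (a : Int) ((a : Int) + g.length) 1).foldl
        (fun mi i => if mi.1 < pvContribAt q i then (pvContribAt q i, i) else mi) st
        = pvArgmax g (a : Int) st := by
  induction g with
  | nil =>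
    intro a st h
    rw [show ((a : Int) + (([] : List Int).length : Int)) = (a : Int) by simp,
      PySem.List.pyRange_one_eq_nil (le_refl _)]
    rfl
  | cons c t ih =>
    intro a st h
    have hlt : (a : Int) < (a : Int) + (((c :: t) : List Int).length : Int) := by
      simp only [List.length_cons]; push_cast; omega
    rw [PySem.List.pyRange_one_cons hlt]
    simp only [List.foldl_cons]
    have h0 : pvContribAt q ((a : Int)) = c := by
      have := h 0 (by simp)
      simpa using this
    rw [h0]
    have hr1 : ((a : Int) + 1) = (((a + 1 : Nat)) : Int) := by push_cast; ring
    have hr2 : ((a : Int) + (((c :: t) : List Int).length : Int)) =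
        (((a + 1 : Nat)) : Int) + ((t.length : Nat) : Int) := by
      simp only [List.length_cons]; push_cast; ring
    rw [hr1, hr2]
    have hstep : pvArgmax (c :: t) ((a : Int)) st =
        pvArgmax t (((a + 1 : Nat)) : Int) (if st.1 < c then (c, (a : Int)) else st) := by
      rw [← hr1]; rfl
    rw [hstep]
    exact ih (a + 1) _ (by
      intro j hj
      have := h (j + 1) (by simp; omega)
      rw [show (a + 1 + j) = (a + (j + 1)) by omega]
      simpa using this)

lemma pvInner_eq_argmax (q : List Int) (hq : q ≠ []) :
    pvInnerLoop q = pvArgmax (pvGaps q) 0 (0, 0) := by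
  have hn : 0 < q.length := List.length_pos_of_ne_nil hq
  have hlen : (pvGaps q).length = q.length := by
    simp only [pvGaps, List.length_cons, pvPmins_length]; omega
  have haux := pvArgmax_aux q (pvGaps q) 0 (0, 0) (by
    intro j hj
    rw [hlen] at hj
    simpa using pvContribAt_eq q hq j hj)
  calc pvInnerLoop q
      = (PySem.List.pyRange 0 ((q.length : Nat) : Int) 1).foldl
          (fun mi i => if mi.1 < pvContribAt q i then (pvContribAt q i, i) else mi) (0, 0) := rfl
    _ = pvArgmax (pvGaps q) 0 (0, 0) := by
        simpa [hlen] using haux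

lemma pvArgmax_spec (g : List Int) :
    ∀ (a : Nat) (mc ins : Int),
      (pvArgmax g (a : Int) (mc, ins)).1 = g.foldl max mc ∧
      ((pvArgmax g (a : Int) (mc, ins)) = (mc, ins) ∨
        ∃ j, j < g.length ∧ (pvArgmax g (a : Int) (mc, ins)).2 = ((a + j : Nat) : Int) ∧
          g.getD j 0 = (pvArgmax g (a : Int) (mc, ins)).1 ∧
          mc < (pvArgmax g (a : Int) (mc, ins)).1) := by
  induction g with
  | nil =>
    intro a mc ins
    exact ⟨rfl, Or.inl rfl⟩
  | cons c t ih =>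
    intro a mc ins
    have hr1 : ((a : Int) + 1) = (((a + 1 : Nat)) : Int) := by push_cast; ring
    by_cases hc : mc < c
    · have hstep : pvArgmax (c :: t) ((a : Int)) (mc, ins) =
          pvArgmax t (((a + 1 : Nat)) : Int) (c, (a : Int)) := by
        rw [← hr1]; simp [pvArgmax, hc]
      obtain ⟨ih1, ih2⟩ := ih (a + 1) c ((a : Int))
      constructor
      · rw [hstep, ih1, List.foldl_cons, show max mc c = c by omega]
      · right
        rcases ih2 with heq | ⟨j, hj, hsnd, hgd, hlt⟩
        · exact ⟨0, by simp, by rw [hstep, heq]; simp, by rw [hstep, heq]; simp, by rw [hstep, heq]; exact hc⟩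
        · refine ⟨j + 1, by simp; omega, ?_, ?_, ?_⟩
          · rw [hstep, hsnd]; congr 1; omega
          · rw [hstep, ← hgd]; simp
          · rw [hstep]; have : c ≤ (pvArgmax t (((a + 1 : Nat)) : Int) (c, (a : Int))).1 := by
              rw [ih1]; exact (PySem.List.le_foldl_max t c).1
            omega
    · have hstep : pvArgmax (c :: t) ((a : Int)) (mc, ins) =
          pvArgmax t (((a + 1 : Nat)) : Int) (mc, ins) := by
        rw [← hr1]; simp [pvArgmax, hc]
      obtain ⟨ih1, ih2⟩ := ih (a + 1) mc ins
      constructor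
      · rw [hstep, ih1, List.foldl_cons, show max mc c = mc by omega]
      · rcases ih2 with heq | ⟨j, hj, hsnd, hgd, hlt⟩
        · left; rw [hstep, heq]
        · right
          refine ⟨j + 1, by simp; omega, ?_, ?_, ?_⟩
          · rw [hstep, hsnd]; congr 1; omega
          · rw [hstep, ← hgd]; simp
          · rw [hstep]; exact hlt

-- characterization of A's inner loop
lemma pvInner_spec (q : List Int) (hq : q ≠ []) :
    (pvInnerLoop q).1 = (pvGaps q).foldl max 0 ∧
    0 ≤ (pvInnerLoop q).2 ∧ (pvInnerLoop q).2.toNat < q.length ∧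
    pvClamp ((pvGaps q).getD (pvInnerLoop q).2.toNat 0) = (pvInnerLoop q).1 := by
  have hn : 0 < q.length := List.length_pos_of_ne_nil hq
  have hlen : (pvGaps q).length = q.length := by
    simp only [pvGaps, List.length_cons, pvPmins_length]; omega
  rw [pvInner_eq_argmax q hq]
  have hspec := pvArgmax_spec (pvGaps q) 0 0 0
  simp only [Nat.cast_zero] at hspec
  obtain ⟨h1, h2⟩ := hspec
  refine ⟨h1, ?_⟩
  rcases h2 with heq | ⟨j, hj, hsnd, hgd, hpos⟩
  · rw [heq]
    refine ⟨le_refl _, by simpa using hn, ?_⟩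
    have hmem : (pvGaps q).getD 0 0 ∈ pvGaps q := by
      simp [pvGaps]
    have hle := (PySem.List.le_foldl_max (pvGaps q) 0).2 _ hmem
    rw [← h1, heq] at hle
    have hle' : (pvGaps q).getD 0 0 ≤ 0 := by simpa using hle
    simp only [Int.toNat_zero]
    unfold pvClamp
    omega
  · rw [hsnd]
    simp only [Nat.zero_add] at *
    refine ⟨Int.natCast_nonneg j, ?_, ?_⟩
    · rw [Int.toNat_natCast]; omega
    · rw [Int.toNat_natCast, hgd]
      unfold pvClamp
      omega

lemma pvMap_erase_mem {f : Int → Int} (l : List Int) (a : Int) (ha : a ∈ l) :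
    ((l : Multiset Int).erase a).map f = ((l.map f : List Int) : Multiset Int).erase (f a) := by
  obtain ⟨l1, l2, rfl⟩ := List.mem_iff_append.mp ha
  have h1 : ((l1 ++ a :: l2 : List Int) : Multiset Int) =
      a ::ₘ ((l1 ++ l2 : List Int) : Multiset Int) := by
    rw [Multiset.coe_eq_coe.mpr (List.perm_middle (a := a) (l₁ := l1) (l₂ := l2))]
    rfl
  have h2 : (((l1 ++ a :: l2).map f : List Int) : Multiset Int) =
      f a ::ₘ (((l1 ++ l2).map f : List Int) : Multiset Int) := by
    have : ((l1 ++ a :: l2).map f).Perm (f a :: (l1 ++ l2).map f) := by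
      simpa using (List.perm_middle (a := a) (l₁ := l1) (l₂ := l2)).map f
    rw [Multiset.coe_eq_coe.mpr this]
    rfl
  rw [h1, h2, Multiset.erase_cons_head, Multiset.erase_cons_head, Multiset.map_coe]

lemma pvGetD_append_length (l r : List Int) (c : Int) :
    (l ++ c :: r).getD l.length 0 = c := by
  induction l with
  | nil => simp
  | cons y l ih => simpa using ih

lemma pvGetD_last_append (l r : List Int) (hr : r ≠ []) :
    (l ++ r).getD ((l ++ r).length - 1) 0 = r.getD (r.length - 1) 0 := by
  induction l with
  | nil => simp
  | cons y l ih =>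
    have h1 : 0 < (l ++ r).length := by
      cases r with
      | nil => exact absurd rfl hr
      | cons hh tt => simp [List.length_append]
    simp only [List.cons_append]
    rw [show (y :: (l ++ r)).length - 1 = ((l ++ r).length - 1) + 1 by
      simp only [List.length_cons]; omega]
    rw [List.getD_cons_succ]
    exact ih

lemma pvGaps_insert_mid (a b : List Int) (x : Int) (ha : a ≠ []) (hb : b ≠ [])
    (hxa : x ≤ a.getD (a.length - 1) 0) (hxb : x ≤ b.getD 0 0) :
    ((pvGaps (a ++ x :: b) : List Int) : Multiset Int) =
      x ::ₘ x ::ₘ ((pvGaps (a ++ b) : List Int) : Multiset Int).erase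
        ((pvGaps (a ++ b)).getD a.length 0) := by
  obtain ⟨hb0, tb, rfl⟩ := List.exists_cons_of_ne_nil hb
  obtain ⟨ha0, ta, rfl⟩ := List.exists_cons_of_ne_nil ha
  set a := ha0 :: ta with hadef
  have hxb' : x ≤ hb0 := by simpa using hxb
  have hw2 : (a ++ x :: hb0 :: tb).getD 0 0 = a.getD 0 0 := by simp [hadef]
  have hw4 : (a ++ hb0 :: tb).getD 0 0 = a.getD 0 0 := by simp [hadef]
  have hw1 : (a ++ x :: hb0 :: tb).getD ((a ++ x :: hb0 :: tb).length - 1) 0 =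
      (hb0 :: tb).getD ((hb0 :: tb).length - 1) 0 := by
    rw [pvGetD_last_append a (x :: hb0 :: tb) (by simp)]
    rw [show (x :: hb0 :: tb).length - 1 = tb.length + 1 by simp]
    rw [List.getD_cons_succ]
    rw [show (hb0 :: tb).length - 1 = tb.length by simp]
  have hw3 : (a ++ hb0 :: tb).getD ((a ++ hb0 :: tb).length - 1) 0 =
      (hb0 :: tb).getD ((hb0 :: tb).length - 1) 0 :=
    pvGetD_last_append a (hb0 :: tb) hb
  have hp1 : pvPmins (a ++ x :: hb0 :: tb) = pvPmins a ++ x :: x :: pvPmins (hb0 :: tb) := by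
    rw [pvPmins_append a (x :: hb0 :: tb) ha (by simp), pvPmins_cons₂]
    simp only [List.getD_cons_zero]
    rw [min_eq_right hxa, min_eq_left hxb']
  have hp2 : pvPmins (a ++ hb0 :: tb) =
      pvPmins a ++ min (a.getD (a.length - 1) 0) hb0 :: pvPmins (hb0 :: tb) := by
    rw [pvPmins_append a _ ha hb]
    simp only [List.getD_cons_zero]
  have hgd : (pvGaps (a ++ hb0 :: tb)).getD a.length 0 =
      min (a.getD (a.length - 1) 0) hb0 := by
    unfold pvGaps
    have hm : a.length = (a.length - 1) + 1 := by simp [hadef]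
    rw [show ((min ((a ++ hb0 :: tb).getD ((a ++ hb0 :: tb).length - 1) 0)
          ((a ++ hb0 :: tb).getD 0 0) :: pvPmins (a ++ hb0 :: tb)).getD a.length 0) =
        ((pvPmins (a ++ hb0 :: tb)).getD (a.length - 1) 0) by
      rw [hm, List.getD_cons_succ]
      simp]
    rw [hp2, show a.length - 1 = (pvPmins a).length by rw [pvPmins_length]]
    exact pvGetD_append_length _ _ _
  rw [hgd]
  unfold pvGaps
  rw [hp1, hp2, hw1, hw2, hw3, hw4]
  have hsplit :
      ((min ((hb0 :: tb).getD ((hb0 :: tb).length - 1) 0) (a.getD 0 0) ::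
          (pvPmins a ++ min (a.getD (a.length - 1) 0) hb0 :: pvPmins (hb0 :: tb)) :
            List Int) : Multiset Int) =
        min (a.getD (a.length - 1) 0) hb0 ::ₘ
          (min ((hb0 :: tb).getD ((hb0 :: tb).length - 1) 0) (a.getD 0 0) ::ₘ
            (((pvPmins a : List Int) : Multiset Int) +
              ((pvPmins (hb0 :: tb) : List Int) : Multiset Int))) := by
    simp only [← Multiset.coe_add, ← Multiset.cons_coe, Multiset.coe_nil,
      ← Multiset.singleton_add]
    abel
  rw [hsplit, Multiset.erase_cons_head]
  simp only [← Multiset.coe_add, ← Multiset.cons_coe, Multiset.coe_nil,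
    ← Multiset.singleton_add]
  abel

lemma pvGaps_insert (q : List Int) (x : Int) (k : Nat) (hq : q ≠ []) (hk : k < q.length)
    (hx : ∀ y ∈ q, x ≤ y) :
    ((pvGaps (q.take k ++ x :: q.drop k) : List Int) : Multiset Int) =
      x ::ₘ x ::ₘ ((pvGaps q : List Int) : Multiset Int).erase ((pvGaps q).getD k 0) := by
  rcases Nat.eq_zero_or_pos k with rfl | hk1
  · simp only [List.take_zero, List.drop_zero, List.nil_append]
    obtain ⟨h, t, rfl⟩ := List.exists_cons_of_ne_nil hq
    have hlast_mem : (h :: t).getD ((h :: t).length - 1) 0 ∈ (h :: t) := by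
      rw [List.getD_eq_getElem _ _ (by simp)]
      exact List.getElem_mem _
    have hxl : x ≤ (h :: t).getD ((h :: t).length - 1) 0 := hx _ hlast_mem
    have hxh : x ≤ h := hx h (by simp)
    have hlist : pvGaps (x :: h :: t) = x :: x :: pvPmins (h :: t) := by
      unfold pvGaps
      rw [pvPmins_cons₂, min_eq_left hxh]
      congr 1
      rw [show (x :: h :: t).length - 1 = ((h :: t).length - 1) + 1 by
        simp only [List.length_cons]; omega]
      rw [List.getD_cons_succ, List.getD_cons_zero]
      exact min_eq_right hxl
    rw [hlist]
    unfold pvGaps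
    simp only [List.getD_cons_zero, ← Multiset.cons_coe]
    rw [Multiset.erase_cons_head]
  · have ha : q.take k ≠ [] := by
      apply List.ne_nil_of_length_pos
      rw [List.length_take]
      omega
    have hb : q.drop k ≠ [] := by
      apply List.ne_nil_of_length_pos
      rw [List.length_drop]
      omega
    have hamem : (q.take k).getD ((q.take k).length - 1) 0 ∈ q.take k := by
      rw [List.getD_eq_getElem _ _ (by
        have := List.length_pos_of_ne_nil ha
        omega)]
      exact List.getElem_mem _
    have hbmem : (q.drop k).getD 0 0 ∈ q.drop k := by
      rw [List.getD_eq_getElem _ _ (List.length_pos_of_ne_nil hb)]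
      exact List.getElem_mem _
    have h1 := pvGaps_insert_mid (q.take k) (q.drop k) x ha hb
      (hx _ (List.take_subset k q hamem)) (hx _ (List.drop_subset k q hbmem))
    rw [List.take_append_drop, List.length_take, show min k q.length = k by omega] at h1
    exact h1

lemma pvFoldl_max_clamp (g : List Int) : ∀ (a : Int), 0 ≤ a →
    g.foldl max a = (g.map pvClamp).foldl max a := by
  induction g with
  | nil => intro a _; rfl
  | cons c t ih =>
    intro a ha
    simp only [List.foldl_cons, List.map_cons]
    rw [ih (max a c) (le_trans ha (le_max_left a c))]
    congr 1
    unfold pvClamp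
    omega

lemma pvFoldl_max_eq (l : List Int) (c : Int) (h0 : 0 ≤ c) (hmem : c ∈ l)
    (hub : ∀ y ∈ l, y ≤ c) : l.foldl max 0 = c := by
  have h2 := (PySem.List.le_foldl_max l 0).2 c hmem
  rcases PySem.List.foldl_max_mem l 0 with h | h
  · omega
  · have h1 := hub _ h
    omega

lemma pvIdeal_getD_mem (s : List Int) (k : Nat) (hk : 1 ≤ k) :
    s.getD (k / 2) 0 ∈ pvIdeal s (k - 1) := by
  unfold pvIdeal
  by_cases h2 : (k - 1) % 2 = 0
  · apply List.mem_append_left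
    rw [if_pos h2, show (k - 1) / 2 = k / 2 by omega]
    simp
  · apply List.mem_append_right
    refine List.mem_flatMap.mpr ⟨k / 2, ?_, by simp⟩
    apply List.mem_range'_1.mpr
    omega

lemma pvIdeal_step (s : List Int) (k : Nat) (hk : 1 ≤ k) :
    ((pvIdeal s k : List Int) : Multiset Int) =
      s.getD k 0 ::ₘ s.getD k 0 ::ₘ
        ((pvIdeal s (k - 1) : List Int) : Multiset Int).erase (s.getD (k / 2) 0) := by
  unfold pvIdeal
  by_cases h2 : k % 2 = 0
  · -- k even (so k ≥ 2); k - 1 odd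
    have hk2 : 2 ≤ k := by omega
    rw [if_pos h2, if_neg (by omega : ¬ (k - 1) % 2 = 0)]
    rw [show k - k / 2 = (k / 2 - 1) + 1 by omega, List.range'_1_concat,
      show k / 2 + 1 + (k / 2 - 1) = k by omega]
    rw [show (k - 1) - (k - 1) / 2 = (k / 2 - 1) + 1 by omega,
      show (k - 1) / 2 + 1 = k / 2 by omega, List.range'_succ]
    simp only [List.flatMap_append, List.flatMap_cons, List.flatMap_nil, List.append_nil,
      List.nil_append, List.singleton_append, List.cons_append]
    simp only [← Multiset.coe_add, ← Multiset.cons_coe, Multiset.coe_nil]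
    rw [Multiset.erase_cons_head]
    simp only [← Multiset.singleton_add]
    abel
  · -- k odd; k - 1 even
    rw [if_neg h2, if_pos (by omega : (k - 1) % 2 = 0)]
    rw [show (k - 1) / 2 = k / 2 by omega]
    rw [show k - k / 2 = ((k - 1) - k / 2) + 1 by omega, List.range'_1_concat,
      show k / 2 + 1 + ((k - 1) - k / 2) = k by omega]
    simp only [List.flatMap_append, List.flatMap_cons, List.flatMap_nil, List.append_nil,
      List.nil_append, List.singleton_append, List.cons_append]
    simp only [← Multiset.coe_add, ← Multiset.cons_coe, Multiset.coe_nil]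
    rw [Multiset.erase_cons_head]
    simp only [← Multiset.singleton_add]
    abel

lemma pvIdeal_max (s : List Int) (k : Nat) (hk : 1 ≤ k)
    (hdesc : ∀ i j : Nat, i ≤ j → j < k → s.getD j 0 ≤ s.getD i 0) :
    ((pvIdeal s (k - 1)).map pvClamp).foldl max 0 = pvClamp (s.getD (k / 2) 0) := by
  have hchar : ∀ z ∈ pvIdeal s (k - 1), ∃ j, k / 2 ≤ j ∧ j < k ∧ z = s.getD j 0 := by
    intro z hz
    unfold pvIdeal at hz
    rcases List.mem_append.mp hz with hz1 | hz2
    · by_cases h2 : (k - 1) % 2 = 0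
      · rw [if_pos h2] at hz1
        exact ⟨(k - 1) / 2, by omega, by omega, by simpa using hz1⟩
      · rw [if_neg h2] at hz1
        simp at hz1
    · obtain ⟨j, hjr, hjm⟩ := List.mem_flatMap.mp hz2
      have := List.mem_range'_1.mp hjr
      refine ⟨j, by omega, by omega, ?_⟩
      simp at hjm
      exact hjm
  apply pvFoldl_max_eq
  · exact le_max_left 0 _
  · exact List.mem_map.mpr ⟨_, pvIdeal_getD_mem s k hk, rfl⟩
  · intro y hy
    obtain ⟨z, hz, rfl⟩ := List.mem_map.mp hy
    obtain ⟨j, hj1, hj2, rfl⟩ := hchar z hz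
    have := hdesc (k / 2) j hj1 hj2
    unfold pvClamp
    omega

lemma pvTailSum_step (s : List Int) (k : Nat) (hk : k < s.length) :
    pvTailSum s k = pvClamp (s.getD (k / 2) 0) + pvTailSum s (k + 1) := by
  unfold pvTailSum
  have h1 : s.length - k = (s.length - (k + 1)) + 1 := by omega
  rw [h1, List.range'_succ]
  simp

lemma pvDesc_getD (s : List Int) (hdesc : s.Pairwise (fun a b => b ≤ a))
    (i j : Nat) (hij : i ≤ j) (hj : j < s.length) : s.getD j 0 ≤ s.getD i 0 := by
  rcases Nat.eq_or_lt_of_le hij with rfl | hlt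
  · exact le_refl _
  · rw [List.getD_eq_getElem _ _ hj, List.getD_eq_getElem _ _ (by omega)]
    exact List.pairwise_iff_getElem.mp hdesc i j (by omega) hj hlt

lemma pvOuter_inv (s : List Int) (hdesc : s.Pairwise (fun a b => b ≤ a)) :
    ∀ (m k : Nat) (q : List Int) (sc : Int),
      m = s.length - k → 1 ≤ k → k ≤ s.length → q ≠ [] →
      ((q : List Int) : Multiset Int) = ((s.take k : List Int) : Multiset Int) →
      (((pvGaps q).map pvClamp : List Int) : Multiset Int) =
        (((pvIdeal s (k - 1)).map pvClamp : List Int) : Multiset Int) →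
      ((s.drop k).foldl pvStepA (q, sc)).2 = sc + pvTailSum s k := by
  intro m
  induction m with
  | zero =>
    intro k q sc h0 hk1 hk2 _ _ _
    have hk : k = s.length := by omega
    subst hk
    rw [List.drop_length]
    simp [pvTailSum]
  | succ m ih =>
    intro k q sc h0 hk1 hk2 hqne hel hgap
    have hklt : k < s.length := by omega
    have hlen : (pvGaps q).length = q.length := by
      simp only [pvGaps, List.length_cons, pvPmins_length]
      have := List.length_pos_of_ne_nil hqne
      omega
    obtain ⟨hi1, hi2, hi3, hi4⟩ := pvInner_spec q hqne
    have hdesc' : ∀ i j : Nat, i ≤ j → j < k → s.getD j 0 ≤ s.getD i 0 :=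
      fun i j hij hj => pvDesc_getD s hdesc i j hij (by omega)
    have hperm : ((pvGaps q).map pvClamp).Perm ((pvIdeal s (k - 1)).map pvClamp) :=
      Multiset.coe_eq_coe.mp hgap
    have hmc : (pvInnerLoop q).1 = pvClamp (s.getD (k / 2) 0) := by
      rw [hi1, pvFoldl_max_clamp _ 0 (le_refl 0), List.Perm.foldl_op_eq hperm,
        pvIdeal_max s k hk1 hdesc']
    set j := (pvInnerLoop q).2.toNat with hjdef
    set x := s.getD k 0 with hxdef
    have hins : PySem.List.insert q (pvInnerLoop q).2 x =
        q.take j ++ x :: q.drop j := by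
      rw [show (pvInnerLoop q).2 = ((j : Nat) : Int) by rw [hjdef, Int.toNat_of_nonneg hi2]]
      exact PySem.List.insert_natCast q j x (by omega)
    have hxle : ∀ y ∈ q, x ≤ y := by
      intro y hy
      have hy2 : y ∈ (↑q : Multiset Int) := Multiset.mem_coe.mpr hy
      rw [hel] at hy2
      have hy' : y ∈ s.take k := Multiset.mem_coe.mp hy2
      obtain ⟨i, hilt, heq⟩ := List.mem_take_iff_getElem.mp hy'
      have h1 := pvDesc_getD s hdesc i k (by omega) hklt
      rw [List.getD_eq_getElem _ _ (by omega : i < s.length)] at h1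
      rw [← heq]
      exact h1
    have hmemgap : (pvGaps q).getD j 0 ∈ pvGaps q := by
      rw [List.getD_eq_getElem _ _ (by omega : j < (pvGaps q).length)]
      exact List.getElem_mem _
    have hgi := pvGaps_insert q x j hqne (by omega) hxle
    have hq'ne : q.take j ++ x :: q.drop j ≠ [] := by simp
    have hpq : q.Perm (s.take k) := Multiset.coe_eq_coe.mp hel
    have hel' : ((q.take j ++ x :: q.drop j : List Int) : Multiset Int) =
        ((s.take (k + 1) : List Int) : Multiset Int) := by
      apply Multiset.coe_eq_coe.mpr
      have h1 : (q.take j ++ x :: q.drop j).Perm (x :: q) := by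
        refine List.Perm.trans List.perm_middle ?_
        rw [List.take_append_drop]
      have h2 : (s.take (k + 1)).Perm (x :: s.take k) := by
        rw [List.take_add_one, List.getElem?_eq_getElem hklt]
        refine List.Perm.trans List.perm_append_comm ?_
        simp only [Option.toList_some, List.singleton_append]
        rw [hxdef, List.getD_eq_getElem _ _ hklt]
      exact h1.trans ((List.Perm.cons x hpq).trans h2.symm)
    have hclampgd : pvClamp ((pvGaps q).getD j 0) = pvClamp (s.getD (k / 2) 0) := by
      rw [hi4, hmc]
    have hgap' : (((pvGaps (q.take j ++ x :: q.drop j)).map pvClamp : List Int) : Multiset Int) =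
        (((pvIdeal s k).map pvClamp : List Int) : Multiset Int) := by
      calc (((pvGaps (q.take j ++ x :: q.drop j)).map pvClamp : List Int) : Multiset Int)
          = Multiset.map pvClamp (↑(pvGaps (q.take j ++ x :: q.drop j))) :=
            (Multiset.map_coe _ _).symm
        _ = Multiset.map pvClamp
            (x ::ₘ x ::ₘ ((pvGaps q : List Int) : Multiset Int).erase ((pvGaps q).getD j 0)) := by
            rw [hgi]
        _ = pvClamp x ::ₘ pvClamp x ::ₘ
            Multiset.map pvClamp (((pvGaps q : List Int) : Multiset Int).erase
              ((pvGaps q).getD j 0)) := by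
            simp
        _ = pvClamp x ::ₘ pvClamp x ::ₘ
            (((pvGaps q).map pvClamp : List Int) : Multiset Int).erase
              (pvClamp ((pvGaps q).getD j 0)) := by
            rw [pvMap_erase_mem _ _ hmemgap]
        _ = pvClamp x ::ₘ pvClamp x ::ₘ
            (((pvIdeal s (k - 1)).map pvClamp : List Int) : Multiset Int).erase
              (pvClamp (s.getD (k / 2) 0)) := by
            rw [hgap, hclampgd]
        _ = Multiset.map pvClamp
            (x ::ₘ x ::ₘ ((pvIdeal s (k - 1) : List Int) : Multiset Int).erase
              (s.getD (k / 2) 0)) := by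
            simp only [Multiset.map_cons]
            rw [pvMap_erase_mem _ _ (pvIdeal_getD_mem s k hk1)]
        _ = Multiset.map pvClamp (↑(pvIdeal s k)) := by
            rw [pvIdeal_step s k hk1]
        _ = (((pvIdeal s k).map pvClamp : List Int) : Multiset Int) := Multiset.map_coe _ _
    have hdropk : s.drop k = s.getD k 0 :: s.drop (k + 1) := by
      rw [List.getD_eq_getElem _ _ hklt, List.getElem_cons_drop]
    rw [hdropk, List.foldl_cons]
    have hstepA : pvStepA (q, sc) (s.getD k 0) =
        (q.take j ++ x :: q.drop j, sc + (pvInnerLoop q).1) := by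
      show (PySem.List.insert q (pvInnerLoop q).2 (s.getD k 0), sc + (pvInnerLoop q).1) = _
      rw [← hxdef, hins]
    rw [hstepA]
    rw [ih (k + 1) (q.take j ++ x :: q.drop j) (sc + (pvInnerLoop q).1) (by omega) (by omega)
      (by omega) hq'ne hel' (by simpa using hgap')]
    rw [pvTailSum_step s k hklt, hmc]
    ring

lemma pvAlt_eq_tailSum (balls : List Int) :
    findMaximumEngagement_alt balls =
      pvTailSum (PySem.List.sorted balls (fun x => x) true) 1 := by
  have halt : findMaximumEngagement_alt balls =
      (PySem.List.pyRange 1 ((PySem.List.sorted balls (fun x => x) true).length : Int) 1).foldl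
        (fun total k => total + max 0 (PySem.List.pyGetD
          (PySem.List.sorted balls (fun x => x) true) (PySem.Int.floordiv k 2) 0)) 0 := rfl
  rw [halt]
  set s := PySem.List.sorted balls (fun x => x) true with hs
  unfold pvTailSum
  rw [PySem.List.pyRange_one]
  have h1 : ((s.length : Int) - 1).toNat = s.length - 1 := by omega
  rw [h1, List.foldl_map, List.range'_eq_map_range]
  rw [List.map_map]
  rw [PySem.List.foldl_add]
  rw [zero_add]
  apply congrArg List.sum
  apply List.map_congr_left
  intro k _
  have h2 : ((1 : Int) + (k : Int)) = (((1 + k : Nat) : Int)) := by push_cast; ring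
  simp only [Function.comp]
  have h3 : PySem.Int.floordiv (((1 + k : Nat) : Int)) 2 = (((1 + k) / 2 : Nat) : Int) := by
    exact_mod_cast PySem.Int.floordiv_natCast (1 + k) 2
  rw [h2, h3, PySem.List.pyGetD_natCast]
  rfl

-- ===== VERDICT (by name: the statement is the Claim_ definition above) =====
theorem findMaximumEngagement_spec : Claim_equal_findMaximumEngagement := by
  intro balls _ hpre
  unfold Spec_findMaximumEngagement
  have hsne : PySem.List.sorted balls (fun x => x) true ≠ [] := by
    intro h
    exact hpre ((PySem.List.sorted_eq_nil_iff balls (fun x => x) true).mp h)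
  set s := PySem.List.sorted balls (fun x => x) true with hs
  have hdesc : s.Pairwise (fun a b => b ≤ a) := by
    simpa using PySem.List.sorted_pairwise_rev (xs := balls) (key := fun x => x)
  have hlen1 : 1 ≤ s.length := List.length_pos_of_ne_nil hsne
  have hA : findMaximumEngagement balls = ((s.drop 1).foldl pvStepA ([s.getD 0 0], 0)).2 := by
    show ((PySem.List.slice s (some 1) none).foldl pvStepA
      ([PySem.List.pyGetD s 0 0], 0)).2 = _
    rw [PySem.List.slice_from_one, ← List.drop_one, PySem.List.pyGetD_zero]
  have hel : (([s.getD 0 0] : List Int) : Multiset Int) =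
      ((s.take 1 : List Int) : Multiset Int) := by
    obtain ⟨h, t, hst⟩ := List.exists_cons_of_ne_nil hsne
    rw [hst]
    simp
  have hgap : (((pvGaps [s.getD 0 0]).map pvClamp : List Int) : Multiset Int) =
      (((pvIdeal s (1 - 1)).map pvClamp : List Int) : Multiset Int) := by
    simp [pvGaps, pvPmins, pvIdeal]
  have hout := pvOuter_inv s hdesc (s.length - 1) 1 [s.getD 0 0] 0 rfl (le_refl 1) hlen1
    (by simp) hel hgap
  rw [hA, hout, pvAlt_eq_tailSum, ← hs, zero_add]
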